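-- pv_equiv track=rewrite | github.com/junrui-liu/coding-problems | hackerrank/interview_iv.py | count_min_to_upper
-- ===== SOURCE A (Python) =====
-- def Cr(n,k):
--   num = 1
--   den = 1
--   for _ in range(k):
--     num *= n
--     den *= k
--     n -= 1
--     k -= 1
--   return num // den
--
-- def count_seq(j,k):
--   if k >= 0 and j-k >= 0:
--     return Cr(j,j-k) * 9**k
--   else:
--     return 0
--
-- def count_min_to_upper(ub, k):
--   """Given an upper bound with len l, count ints in [10**l, ub] with k non-zero digits"""
--   def rec(ub, k, acc):
--     l = len(ub)
--     if l == 0: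
--       if k == 0: return acc+1
--       else: return acc
--     if l < k: return acc
--     if ub[0] == 0:
--       return rec(ub[1:], k, acc)
--     ub_hi_set = [ub[i] if i == 0 else 0 for i in range(l)]
--     count_lower = count_seq(l-1, k) + (ub[0]-1) * count_seq(l-1,k-1)
--     return rec(ub[1:], k-1, acc + count_lower)
--   if ub[0] == 1:
--     return rec(ub[1:], k-1, 0)
--   else:
--     lower = (ub[0]-1) * count_seq(len(ub)-1, k-1)
--     return lower + rec(ub[1:], k-1, 0)
-- ===== SOURCE B (Python) =====
-- def Cr(n,k):
--   num = 1
--   den = 1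
--   for _ in range(k):
--     num *= n
--     den *= k
--     n -= 1
--     k -= 1
--   return num // den
--
-- def count_seq(j,k):
--   if k >= 0 and j-k >= 0:
--     return Cr(j,j-k) * 9**k
--   else:
--     return 0
--
-- def count_min_to_upper(ub, k):
--   """Given an upper bound with len l, count ints in [10**l, ub] with k non-zero digits"""
--   # leading digit: (ub[0]-1)*count_seq(...) is 0 when ub[0]==1, so no branch needed
--   acc = (ub[0] - 1) * count_seq(len(ub) - 1, k - 1)
--   k -= 1
--   rem = len(ub) - 1
--   for d in ub[1:]:
--     if rem < k:
--       return acc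
--     if d != 0:
--       acc += count_seq(rem - 1, k) + (d - 1) * count_seq(rem - 1, k - 1)
--       k -= 1
--     rem -= 1
--   return acc + 1 if k == 0 else acc
-- ===== Notes on version B (the rewrite author's own statement) =====
-- stated objective: simpler
-- what changed: The inner recursion rec (and the duplicated leading-digit branch, folded away since (ub[0]-1)*count_seq(...) is 0 when ub[0]==1) is replaced by a single left-to-right for loop over the remaining digits with an explicit accumulator, early return when fewer digits remain than nonzero digits needed, and a final +1 when k reaches exactly 0.
import Mathlib
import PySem

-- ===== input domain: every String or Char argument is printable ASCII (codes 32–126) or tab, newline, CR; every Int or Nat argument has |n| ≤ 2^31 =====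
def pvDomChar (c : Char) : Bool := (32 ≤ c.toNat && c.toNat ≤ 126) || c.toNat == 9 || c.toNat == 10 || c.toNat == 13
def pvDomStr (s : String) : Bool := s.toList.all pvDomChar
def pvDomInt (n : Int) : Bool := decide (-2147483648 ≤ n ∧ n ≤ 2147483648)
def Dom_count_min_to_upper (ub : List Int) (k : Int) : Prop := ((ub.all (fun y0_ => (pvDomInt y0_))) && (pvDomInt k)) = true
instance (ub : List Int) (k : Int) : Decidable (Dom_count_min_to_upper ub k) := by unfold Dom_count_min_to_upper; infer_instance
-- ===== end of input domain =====

-- B replaces the inner recursion (and the duplicated leading-digit branch) by a single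
-- left-to-right loop over the remaining digits; objective: simpler decomposition, same cost.

-- ===== PORT A =====
-- shared helpers: Cr and count_seq are identical in Source A and Source B, ported once
def pyCr (n k : Int) : Int :=
  let s := (PySem.List.pyRange 0 k 1).foldl
    (fun (s : Int × Int × Int × Int) _ =>
      let (num, den, n, k) := s
      (num * n, den * k, n - 1, k - 1)) (1, 1, n, k)
  PySem.Int.floordiv s.1 s.2.1

def pyCountSeq (j k : Int) : Int :=
  if k ≥ 0 ∧ j - k ≥ 0 then pyCr j (j - k) * 9 ^ k.toNat else 0
  -- 9**k: k ≥ 0 holds in this branch, so 9 ^ k.toNat is exact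

def pyRec : List Int → Int → Int → Int
  | [], k, acc => if k = 0 then acc + 1 else acc
  | d :: rest, k, acc =>
    let l : Int := (d :: rest).length
    if l < k then acc
    else if d = 0 then pyRec rest k acc
    else
      let _ubHiSet := (PySem.List.pyRange 0 l 1).map (fun i => if i = 0 then d else 0)
      let countLower := pyCountSeq (l - 1) k + (d - 1) * pyCountSeq (l - 1) (k - 1)
      pyRec rest (k - 1) (acc + countLower)

def count_min_to_upper (ub : List Int) (k : Int) : Int :=
  match ub with
  | [] => 0  -- Python raises IndexError on ub[0]; excluded by Pre_
  | d :: rest =>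
    if d = 1 then pyRec rest (k - 1) 0
    else
      let lower := (d - 1) * pyCountSeq ((ub.length : Int) - 1) (k - 1)
      lower + pyRec rest (k - 1) 0

-- ===== PORT B =====
-- loop body of Source B's for-loop (early return modelled by the `done` flag); state = (rem, k, acc, done)
def altStep (s : Int × Int × Int × Bool) (d : Int) : Int × Int × Int × Bool :=
  let (rem, k, acc, done) := s
  if done then (rem, k, acc, done)
  else if rem < k then (rem, k, acc, true)
  else if d ≠ 0 then
    (rem - 1, k - 1, acc + (pyCountSeq (rem - 1) k + (d - 1) * pyCountSeq (rem - 1) (k - 1)), false)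
  else (rem - 1, k, acc, false)

def count_min_to_upper_alt (ub : List Int) (k : Int) : Int :=
  match ub with
  | [] => 0  -- outside Pre_ (A raises there)
  | d :: rest =>
    let acc0 := (d - 1) * pyCountSeq ((rest.length : Int)) (k - 1)
    let s := rest.foldl altStep ((rest.length : Int), k - 1, acc0, false)
    if s.2.2.2 then s.2.2.1
    else if s.2.1 = 0 then s.2.2.1 + 1 else s.2.2.1

-- ===== PRECONDITION & SPEC =====
-- Pre_ excludes only the empty list, on which Python A raises IndexError at ub[0].
def Pre_count_min_to_upper (ub : List Int) (_k : Int) : Prop := ub ≠ []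
instance (ub : List Int) (_k : Int) : Decidable (Pre_count_min_to_upper ub _k) := by
  unfold Pre_count_min_to_upper; infer_instance
def pvWitness_count_min_to_upper : List Int × Int := ([1, 5], 2)

def Spec_count_min_to_upper (ub : List Int) (k : Int) (out : Int) : Prop := out = count_min_to_upper_alt ub k
instance (ub : List Int) (k : Int) (out : Int) : Decidable (Spec_count_min_to_upper ub k out) := by unfold Spec_count_min_to_upper; infer_instance

-- ===== CLAIM (what is proved, stated in full; the proofs are below) =====
def Claim_equal_count_min_to_upper : Prop := ∀ (ub : List Int) (k : Int), Dom_count_min_to_upper ub k → Pre_count_min_to_upper ub k → Spec_count_min_to_upper ub k (count_min_to_upper ub k)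

-- ===== LEMMAS AND PROOFS =====

-- once the done flag is set, the fold changes nothing
theorem altStep_done (l : List Int) (rem k acc : Int) :
    l.foldl altStep (rem, k, acc, true) = (rem, k, acc, true) := by
  induction l generalizing rem k acc with
  | nil => rfl
  | cons d t ih => simpa [altStep] using ih rem k acc

-- the loop of B computes exactly A's rec when started with rem = length of the suffix
theorem fold_eq_pyRec (l : List Int) (k acc : Int) :
    (let s := l.foldl altStep ((l.length : Int), k, acc, false)
     if s.2.2.2 then s.2.2.1 else if s.2.1 = 0 then s.2.2.1 + 1 else s.2.2.1)
    = pyRec l k acc := by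
  induction l generalizing k acc with
  | nil => simp [pyRec]
  | cons d t ih =>
    by_cases hlt : (t.length : Int) + 1 < k
    · simp [pyRec, hlt, altStep, altStep_done]
    · by_cases hd : d = 0
      · subst hd
        simpa [pyRec, hlt, altStep] using ih k acc
      · simpa [pyRec, hlt, hd, altStep] using
          ih (k - 1) (acc + (pyCountSeq (t.length) k + (d - 1) * pyCountSeq (t.length) (k - 1)))

-- the accumulator threads additively through rec
theorem pyRec_acc (l : List Int) (k a b : Int) :
    pyRec l k (a + b) = a + pyRec l k b := by
  induction l generalizing k a b with
  | nil =>
    by_cases hk : k = 0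
    · simp [pyRec, hk]; ring
    · simp [pyRec, hk]
  | cons d t ih =>
    by_cases hlt : (t.length : Int) + 1 < k
    · simp [pyRec, hlt]
    · by_cases hd : d = 0
      · subst hd; simp [pyRec, hlt, ih]
      · simp [pyRec, hlt, hd, add_assoc, ih]

-- ===== VERDICT (by name: the statement is the Claim_ definition above) =====
theorem count_min_to_upper_spec : Claim_equal_count_min_to_upper := by
  intro ub k _ hpre
  unfold Spec_count_min_to_upper
  match ub with
  | [] => exact absurd rfl hpre
  | d :: rest =>
    simp only [count_min_to_upper, count_min_to_upper_alt]
    rw [fold_eq_pyRec rest (k - 1) ((d - 1) * pyCountSeq ((rest.length : Int)) (k - 1))]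
    have hacc := pyRec_acc rest (k - 1) ((d - 1) * pyCountSeq ((rest.length : Int)) (k - 1)) 0
    by_cases hd : d = 1
    · simp [hd]
    · simp only [hd, ite_false]
      simp only [add_zero] at hacc
      simp [hacc]
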